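-- pv_equiv track=rewrite | github.com/Cryogenic2005/Advent-of-Code | 2024/src/silver/D9.py | moveEnd
-- ===== SOURCE A (Python) =====
-- def moveEnd(s: list[str]) -> str:
--     head_idx = 0
--     tail_idx = len(s) - 1
--
--     while head_idx < tail_idx:
--         while head_idx < len(s) and s[head_idx] != '.':
--             head_idx += 1
--
--         while tail_idx >= 0 and s[tail_idx] == '.':
--             tail_idx -= 1
--
--         if head_idx < tail_idx:
--             s[head_idx], s[tail_idx] = s[tail_idx], s[head_idx]
--
--     return s
-- ===== SOURCE B (Python) =====
-- def moveEnd(s: list[str]) -> str: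
--     # Count-then-fill: mutates s in place (like A) and returns it.
--     m = sum(1 for x in s if x != '.')
--     fill = [x for x in reversed(s[m:]) if x != '.']
--     fi = 0
--     for i in range(m):
--         if s[i] == '.':
--             s[i] = fill[fi]
--             fi += 1
--     for i in range(m, len(s)):
--         s[i] = '.'
--     return s
-- ===== Notes on version B (the rewrite author's own statement) =====
-- stated objective: alternative
-- what changed: Replaces A's interleaved two-pointer scan-and-swap with a two-phase count-then-fill pass: count the non-dot elements m, gather the non-dot elements of s[m:] rightmost-first, overwrite the dots among the first m slots with them, and set everything from m on to '.'.
import Mathlib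
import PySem

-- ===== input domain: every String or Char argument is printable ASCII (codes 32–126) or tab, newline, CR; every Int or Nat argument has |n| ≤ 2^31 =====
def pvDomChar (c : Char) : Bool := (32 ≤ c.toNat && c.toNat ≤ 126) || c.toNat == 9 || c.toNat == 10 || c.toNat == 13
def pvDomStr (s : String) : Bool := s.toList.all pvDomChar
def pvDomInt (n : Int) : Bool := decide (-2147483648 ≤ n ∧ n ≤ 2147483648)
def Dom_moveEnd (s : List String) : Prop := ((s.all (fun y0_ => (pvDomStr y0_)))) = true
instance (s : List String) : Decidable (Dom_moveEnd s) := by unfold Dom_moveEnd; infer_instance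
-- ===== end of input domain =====

-- B replaces A's interleaved two-pointer swapping with a count-then-fill two-phase pass
-- (objective: alternative decomposition); both Pythons mutate s in place and return it —
-- the equivalence proved here is about the returned value.

-- ===== PORT A =====
-- inner `while head_idx < len(s) and s[head_idx] != '.'`; getD is exact because the
-- guard checks the index is in range before the list is read
def advHead (s : List String) (h : Int) : Int :=
  if h < (s.length : Int) ∧ s.getD h.toNat "" ≠ "." then advHead s (h + 1) else h
termination_by ((s.length : Int) - h).toNat
decreasing_by omega

-- inner `while tail_idx >= 0 and s[tail_idx] == '.'`
def retTail (s : List String) (t : Int) : Int :=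
  if 0 ≤ t ∧ s.getD t.toNat "" = "." then retTail s (t - 1) else t
termination_by (t + 1).toNat
decreasing_by omega

-- outer `while head_idx < tail_idx` loop; the fuel guard only makes the recursion
-- total — s.length + 1 iterations are proved sufficient below
def loopA : Nat → List String → Int → Int → List String
  | 0, s, _, _ => s
  | fuel + 1, s, h, t =>
    if h < t then
      let h' := advHead s h
      let t' := retTail s t
      if h' < t' then
        loopA fuel ((s.set h'.toNat (s.getD t'.toNat "")).set t'.toNat (s.getD h'.toNat "")) h' t'
      else s
    else s

def moveEnd (s : List String) : List String :=
  loopA (s.length + 1) s 0 ((s.length : Int) - 1)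

-- ===== PORT B =====
-- the `for i in range(m)` fill loop of Source B, walking the first m cells and consuming
-- `fill` front-first (fill[fi], fi += 1); the [] fallback is never reached
def fillLoop : List String → List String → List String
  | [], _ => []
  | x :: xs, fill =>
    if x = "." then
      match fill with
      | f :: fs => f :: fillLoop xs fs
      | [] => x :: fillLoop xs []
    else x :: fillLoop xs fill

def moveEnd_alt (s : List String) : List String :=
  let m := s.countP (fun x => x != ".")
  let fill := (s.drop m).reverse.filter (fun x => x != ".")
  fillLoop (s.take m) fill ++ List.replicate (s.length - m) "."

-- ===== PRECONDITION & SPEC =====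
def Spec_moveEnd (s : List String) (out : List String) : Prop := out = moveEnd_alt s
instance (s : List String) (out : List String) : Decidable (Spec_moveEnd s out) := by unfold Spec_moveEnd; infer_instance

-- ===== CLAIM (what is proved, stated in full; the proofs are below) =====
def Claim_equal_moveEnd : Prop := ∀ (s : List String), Dom_moveEnd s → Spec_moveEnd s (moveEnd s)

-- ===== LEMMAS AND PROOFS =====

lemma adv_stop_dot (s : List String) (h : Int) (hd : s.getD h.toNat "" = ".") :
    advHead s h = h := by
  rw [advHead, if_neg]; rintro ⟨-, h2⟩; exact h2 hd

lemma adv_step (s : List String) (h : Int) (hlt : h < (s.length : Int))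
    (hd : s.getD h.toNat "" ≠ ".") : advHead s h = advHead s (h + 1) := by
  rw [advHead, if_pos ⟨hlt, hd⟩]

lemma adv_ge (s : List String) (h : Int) : h ≤ advHead s h := by
  generalize hn : ((s.length : Int) - h).toNat = n
  induction n using Nat.strong_induction_on generalizing h with
  | _ n ih =>
    by_cases hc : h < (s.length : Int) ∧ s.getD h.toNat "" ≠ "."
    · rw [advHead, if_pos hc]
      have := ih (((s.length : Int) - (h + 1)).toNat) (by omega) (h + 1) rfl
      omega
    · rw [advHead, if_neg hc]

lemma adv_idem (s : List String) (h : Int) : advHead s (advHead s h) = advHead s h := by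
  generalize hn : ((s.length : Int) - h).toNat = n
  induction n using Nat.strong_induction_on generalizing h with
  | _ n ih =>
    by_cases hc : h < (s.length : Int) ∧ s.getD h.toNat "" ≠ "."
    · rw [adv_step s h hc.1 hc.2]
      exact ih (((s.length : Int) - (h + 1)).toNat) (by omega) (h + 1) rfl
    · have e : advHead s h = h := by rw [advHead, if_neg hc]
      rw [e]; exact e

lemma ret_stop (s : List String) (t : Int) (hc : ¬ (0 ≤ t ∧ s.getD t.toNat "" = ".")) :
    retTail s t = t := by
  rw [retTail]; simp only [if_neg hc]

lemma ret_step (s : List String) (t : Int) (ht : 0 ≤ t) (hd : s.getD t.toNat "" = ".") :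
    retTail s t = retTail s (t - 1) := by
  rw [retTail, if_pos ⟨ht, hd⟩]

lemma ret_le (s : List String) (t : Int) : retTail s t ≤ t := by
  generalize hn : (t + 1).toNat = n
  induction n using Nat.strong_induction_on generalizing t with
  | _ n ih =>
    by_cases hc : 0 ≤ t ∧ s.getD t.toNat "" = "."
    · rw [retTail, if_pos hc]
      have := ih ((t - 1) + 1).toNat (by omega) (t - 1) rfl
      omega
    · rw [retTail, if_neg hc]

lemma ret_idem (s : List String) (t : Int) : retTail s (retTail s t) = retTail s t := by
  generalize hn : (t + 1).toNat = n
  induction n using Nat.strong_induction_on generalizing t with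
  | _ n ih =>
    by_cases hc : 0 ≤ t ∧ s.getD t.toNat "" = "."
    · rw [ret_step s t hc.1 hc.2]
      exact ih ((t - 1) + 1).toNat (by omega) (t - 1) rfl
    · have e : retTail s t = t := by rw [retTail, if_neg hc]
      rw [e]; exact e


lemma loopA_adv (fuel : Nat) (s : List String) (h t : Int) :
    loopA fuel s h t = loopA fuel s (advHead s h) t := by
  cases fuel with
  | zero => rfl
  | succ f =>
    simp only [loopA]
    by_cases h1 : h < t
    · by_cases h2 : advHead s h < t
      · rw [if_pos h1, if_pos h2, adv_idem]
      · rw [if_pos h1, if_neg h2,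
          if_neg (show ¬ advHead s h < retTail s t by have := ret_le s t; omega)]
    · rw [if_neg h1, if_neg (show ¬ advHead s h < t by have := adv_ge s h; omega)]

lemma loopA_ret (fuel : Nat) (s : List String) (h t : Int) :
    loopA fuel s h t = loopA fuel s h (retTail s t) := by
  cases fuel with
  | zero => rfl
  | succ f =>
    simp only [loopA]
    by_cases h1 : h < t
    · by_cases h2 : h < retTail s t
      · rw [if_pos h1, if_pos h2, ret_idem]
      · rw [if_pos h1, if_neg h2,
          if_neg (show ¬ advHead s h < retTail s t by have := adv_ge s h; omega)]
    · rw [if_neg h1, if_neg (show ¬ h < retTail s t by have := ret_le s t; omega)]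

lemma getD_append_len (pre : List String) (x : String) (rest : List String) :
    (pre ++ x :: rest).getD pre.length "" = x := by
  rw [List.getD_append_right _ _ _ _ (le_refl _)]
  simp [List.getD]

lemma set_append_len (pre : List String) (x y : String) (rest : List String) :
    (pre ++ x :: rest).set pre.length y = pre ++ y :: rest := by
  rw [List.set_append]
  simp

lemma ret_over_dots (d : List String) : ∀ (p rest : List String), (∀ x ∈ d, x = ".") →
    retTail (p ++ d ++ rest) ((p.length : Int) + d.length - 1)
      = retTail (p ++ d ++ rest) ((p.length : Int) - 1) := by
  induction d using List.reverseRecOn with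
  | nil => intro p rest _; simp
  | append_singleton d x ih =>
    intro p rest hd
    have hx : x = "." := hd x (by simp)
    have hL : p ++ (d ++ [x]) ++ rest = p ++ d ++ (x :: rest) := by simp
    have hidx : (p.length : Int) + ((d ++ [x]).length : Int) - 1
        = (p.length : Int) + (d.length : Int) := by
      simp; omega
    rw [hL, hidx]
    have hget : (p ++ d ++ (x :: rest)).getD ((p.length : Int) + (d.length : Int)).toNat "" = "." := by
      have h1 : ((p.length : Int) + (d.length : Int)).toNat = (p ++ d).length := by
        simp; omega
      rw [h1, getD_append_len]
      exact hx
    rw [ret_step _ _ (by omega) hget]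
    have h2 : (p.length : Int) + (d.length : Int) - 1
        = (p.length : Int) + (d.length : Int) - 1 := rfl
    exact ih p (x :: rest) (fun y hy => hd y (by simp [hy]))

lemma ret_end_of_pre (p rest : List String) (hp : ∀ x ∈ p, x ≠ ".") :
    retTail (p ++ rest) ((p.length : Int) - 1) = (p.length : Int) - 1 := by
  apply ret_stop
  rintro ⟨h0, hdot⟩
  have hlen : 1 ≤ p.length := by omega
  have hidx : ((p.length : Int) - 1).toNat = p.length - 1 := by omega
  rw [hidx, List.getD_append _ _ _ _ (by omega),
    List.getD_eq_getElem _ _ (by omega)] at hdot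
  exact hp _ (List.getElem_mem _) hdot

lemma dropWhile_head_false {p : String → Bool} :
    ∀ (l : List String) (v : String) (rb : List String),
      List.dropWhile p l = v :: rb → p v = false := by
  intro l
  induction l with
  | nil => intro v rb h; simp at h
  | cons a l ih =>
    intro v rb h
    by_cases ha : p a
    · rw [List.dropWhile_cons_of_pos ha] at h; exact ih v rb h
    · rw [List.dropWhile_cons_of_neg ha] at h
      cases h
      simpa using ha

lemma alt_def (s : List String) :
    moveEnd_alt s = fillLoop (s.take (s.countP (fun x => x != ".")))
      ((s.drop (s.countP (fun x => x != "."))).reverse.filter (fun x => x != "."))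
      ++ List.replicate (s.length - s.countP (fun x => x != ".")) "." := rfl

lemma alt_cons_nondot (x : String) (xs : List String) (hx : x ≠ ".") :
    moveEnd_alt (x :: xs) = x :: moveEnd_alt xs := by
  have hpx : (x != ".") = true := by simp [hx]
  rw [alt_def, alt_def]
  simp only [List.countP_cons, hpx, if_pos, List.take_succ_cons, List.drop_succ_cons,
    List.length_cons, Nat.succ_sub_succ]
  simp [fillLoop, hx]

lemma alt_all_dots (s : List String) (hs : ∀ x ∈ s, x = ".") : moveEnd_alt s = s := by
  have hm : s.countP (fun x => x != ".") = 0 :=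
    List.countP_eq_zero.2 (by intro a ha; simp [hs a ha])
  rw [alt_def, hm]
  simp only [List.take_zero, List.drop_zero, fillLoop, List.nil_append, Nat.sub_zero]
  exact (List.eq_replicate_of_mem hs).symm

lemma alt_split (body : List String) (v : String) (dots : List String)
    (hv : v ≠ ".") (hdots : ∀ x ∈ dots, x = ".") :
    moveEnd_alt ("." :: (body ++ v :: dots)) = v :: moveEnd_alt body ++ "." :: dots := by
  have hpv : (v != ".") = true := by simp [hv]
  have hcd : dots.countP (fun x => x != ".") = 0 :=
    List.countP_eq_zero.2 (by intro a ha; simp [hdots a ha])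
  have hmb := List.countP_le_length (p := fun x : String => x != ".") (l := body)
  have hm : ("." :: (body ++ v :: dots)).countP (fun x => x != ".")
      = body.countP (fun x => x != ".") + 1 := by
    simp [List.countP_append, hpv, hcd]
  rw [alt_def, hm]
  have htake : ("." :: (body ++ v :: dots)).take (body.countP (fun x => x != ".") + 1)
      = "." :: body.take (body.countP (fun x => x != ".")) := by
    rw [List.take_succ_cons, List.take_append_of_le_length hmb]
  have hdrop : ("." :: (body ++ v :: dots)).drop (body.countP (fun x => x != ".") + 1)
      = body.drop (body.countP (fun x => x != ".")) ++ v :: dots := by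
    rw [List.drop_succ_cons, List.drop_append_of_le_length hmb]
  rw [htake, hdrop]
  have hfill : ((body.drop (body.countP (fun x => x != ".")) ++ v :: dots).reverse).filter
        (fun x => x != ".")
      = v :: ((body.drop (body.countP (fun x => x != "."))).reverse).filter (fun x => x != ".") := by
    rw [List.reverse_append, List.filter_append]
    have : (v :: dots).reverse.filter (fun x => x != ".") = [v] := by
      rw [show (v :: dots).reverse = dots.reverse ++ [v] by simp, List.filter_append]
      have h1 : dots.reverse.filter (fun x => x != ".") = [] :=
        List.filter_eq_nil_iff.2 (by intro a ha; simp [hdots a (List.mem_reverse.1 ha)])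
      simp [h1, hpv]
    rw [this]
    rfl
  rw [hfill]
  have hloop : fillLoop ("." :: body.take (body.countP (fun x => x != ".")))
        (v :: ((body.drop (body.countP (fun x => x != "."))).reverse).filter (fun x => x != "."))
      = v :: fillLoop (body.take (body.countP (fun x => x != ".")))
        (((body.drop (body.countP (fun x => x != "."))).reverse).filter (fun x => x != ".")) := by
    simp [fillLoop]
  rw [hloop]
  have hrep : ("." :: (body ++ v :: dots)).length - (body.countP (fun x => x != ".") + 1)
      = (body.length - body.countP (fun x => x != ".")) + (dots.length + 1) := by
    simp [List.length_cons, List.length_append]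
    omega
  rw [hrep, List.replicate_add]
  have hdots' : List.replicate (dots.length + 1) "." = "." :: dots := by
    rw [List.replicate_succ]
    rw [← List.eq_replicate_of_mem hdots]
  rw [alt_def, hdots']
  simp

lemma main_loop : ∀ (n : Nat) (mid pre suf : List String) (fuel : Nat) (t : Int),
    mid.length = n → (∀ x ∈ pre, x ≠ ".") → (∀ x ∈ suf, x = ".") → n + 1 ≤ fuel →
    t = (pre.length : Int) + mid.length - 1 →
    loopA fuel (pre ++ mid ++ suf) (pre.length : Int) t = pre ++ moveEnd_alt mid ++ suf := by
  intro n
  induction n using Nat.strong_induction_on with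
  | _ n ih =>
    intro mid pre suf fuel t hlen hpre hsuf hfuel ht
    obtain ⟨f, rfl⟩ : ∃ f, fuel = f + 1 := ⟨fuel - 1, by omega⟩
    cases mid with
    | nil =>
      simp only [loopA]
      rw [if_neg (by simp at ht; omega)]
      simp [alt_all_dots [] (by simp)]
    | cons x xs =>
      subst hlen
      by_cases hx : x = "."
      · subst hx
        rcases hr : xs.reverse.dropWhile (fun y => y == ".") with - | ⟨v, rb⟩
        · -- the middle segment is all dots: the loop returns the list unchanged
          have hxs : ∀ y ∈ xs, y = "." := by
            intro y hy
            have h1 : xs.reverse = xs.reverse.takeWhile (fun y => y == ".") := by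
              conv_lhs => rw [← List.takeWhile_append_dropWhile
                (p := fun y => y == ".") (l := xs.reverse)]
              rw [hr, List.append_nil]
            have h2 : y ∈ xs.reverse.takeWhile (fun y => y == ".") := by
              rw [← h1]; exact List.mem_reverse.2 hy
            have := List.mem_takeWhile_imp h2
            simpa using this
          have hmid : ∀ y ∈ ("." :: xs), y = "." := by
            intro y hy
            rcases List.mem_cons.1 hy with h | h
            · exact h
            · exact hxs y h
          rw [alt_all_dots _ hmid]
          by_cases hxe : xs.length = 0
          · simp only [loopA]
            rw [if_neg (by simp [hxe] at ht ⊢; omega)]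
          · -- head pointer stays, tail pointer crosses below it, loop exits
            have hadv : advHead (pre ++ "." :: xs ++ suf) (pre.length : Int)
                = (pre.length : Int) := by
              apply adv_stop_dot
              have h1 : ((pre.length : Int)).toNat = pre.length := by omega
              rw [h1, show pre ++ "." :: xs ++ suf = pre ++ "." :: (xs ++ suf) from by simp]
              exact getD_append_len pre "." (xs ++ suf)
            have hret : retTail (pre ++ "." :: xs ++ suf) t = (pre.length : Int) - 1 := by
              have h1 : t = (pre.length : Int) + (("." :: xs).length : Int) - 1 := by
                simpa using ht
              rw [h1, ret_over_dots ("." :: xs) pre suf hmid, List.append_assoc]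
              exact ret_end_of_pre pre ("." :: xs ++ suf) hpre
            simp only [loopA]
            rw [if_pos (by simp at ht ⊢; omega), hadv, hret,
              if_neg (by omega)]
        · -- mid = "." :: (body ++ v :: dots) with v the rightmost non-dot
          have hvp : ((fun y => y == ".") v) = false :=
            dropWhile_head_false xs.reverse v rb hr
          have hv : v ≠ "." := by simpa using hvp
          have hsplitrev : xs.reverse = xs.reverse.takeWhile (fun y => y == ".") ++ v :: rb := by
            conv_lhs => rw [← List.takeWhile_append_dropWhile
              (p := fun y => y == ".") (l := xs.reverse)]
            rw [hr]
          have hdots0 : ∀ y ∈ (xs.reverse.takeWhile (fun y => y == ".")).reverse, y = "." := by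
            intro y hy
            have := List.mem_takeWhile_imp (List.mem_reverse.1 hy)
            simpa using this
          have hxs : xs = rb.reverse ++ v :: (xs.reverse.takeWhile (fun y => y == ".")).reverse := by
            have := congrArg List.reverse hsplitrev
            simpa using this
          obtain ⟨body, dots, hdots, hxseq⟩ :
              ∃ body dots, (∀ y ∈ dots, y = ".") ∧ xs = body ++ v :: dots :=
            ⟨rb.reverse, (xs.reverse.takeWhile (fun y => y == ".")).reverse, hdots0, hxs⟩
          clear hr hsplitrev hdots0 hxs hvp
          subst hxseq
          -- pointer values for this iteration
          have hadv : advHead (pre ++ "." :: (body ++ v :: dots) ++ suf) (pre.length : Int)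
              = (pre.length : Int) := by
            apply adv_stop_dot
            have h1 : ((pre.length : Int)).toNat = pre.length := by omega
            rw [h1, show pre ++ "." :: (body ++ v :: dots) ++ suf
              = pre ++ "." :: (body ++ v :: dots ++ suf) from by simp]
            exact getD_append_len pre "." _
          have hret : retTail (pre ++ "." :: (body ++ v :: dots) ++ suf) t
              = (pre.length : Int) + body.length + 1 := by
            have h1 : t = ((pre ++ "." :: body ++ [v]).length : Int) + (dots.length : Int) - 1 := by
              simp at ht ⊢; omega
            rw [show pre ++ "." :: (body ++ v :: dots) ++ suf
                = (pre ++ "." :: body ++ [v]) ++ dots ++ suf from by simp,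
              h1, ret_over_dots dots _ suf hdots]
            have h4 : retTail ((pre ++ "." :: body ++ [v]) ++ dots ++ suf)
                (((pre ++ "." :: body ++ [v]).length : Int) - 1)
                = ((pre ++ "." :: body ++ [v]).length : Int) - 1 := by
              apply ret_stop
              rintro ⟨h0, hdot⟩
              have h5 : (((pre ++ "." :: body ++ [v]).length : Int) - 1).toNat
                  = (pre ++ "." :: body).length := by simp; omega
              rw [h5, show (pre ++ "." :: body ++ [v]) ++ dots ++ suf
                = (pre ++ "." :: body) ++ v :: (dots ++ suf) from by simp,
                getD_append_len] at hdot
              exact hv hdot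
            rw [h4]
            simp; omega
          -- one unfolding of the outer loop: the guard holds and a swap happens
          have hswap : ((pre ++ "." :: (body ++ v :: dots) ++ suf).set
                ((pre.length : Int)).toNat
                ((pre ++ "." :: (body ++ v :: dots) ++ suf).getD
                  (((pre.length : Int) + body.length + 1)).toNat "")).set
                ((((pre.length : Int) + body.length + 1)).toNat)
                ((pre ++ "." :: (body ++ v :: dots) ++ suf).getD ((pre.length : Int)).toNat "")
              = (pre ++ [v]) ++ body ++ ("." :: (dots ++ suf)) := by
            have e1 : ((pre.length : Int)).toNat = pre.length := by omega
            have e2 : (((pre.length : Int) + body.length + 1)).toNat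
                = (pre ++ "." :: body).length := by simp; omega
            rw [e1, e2]
            rw [show (pre ++ "." :: (body ++ v :: dots) ++ suf).getD
                (pre ++ "." :: body).length "" = v from by
              rw [show pre ++ "." :: (body ++ v :: dots) ++ suf
                = (pre ++ "." :: body) ++ v :: (dots ++ suf) from by simp]
              exact getD_append_len _ _ _]
            rw [show (pre ++ "." :: (body ++ v :: dots) ++ suf).getD pre.length "" = "." from by
              rw [show pre ++ "." :: (body ++ v :: dots) ++ suf
                = pre ++ "." :: (body ++ v :: dots ++ suf) from by simp]
              exact getD_append_len _ _ _]
            rw [show (pre ++ "." :: (body ++ v :: dots) ++ suf).set pre.length v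
                = pre ++ v :: (body ++ v :: dots ++ suf) from by
              rw [show pre ++ "." :: (body ++ v :: dots) ++ suf
                = pre ++ "." :: (body ++ v :: dots ++ suf) from by simp]
              exact set_append_len _ _ _ _]
            rw [show pre ++ v :: (body ++ v :: dots ++ suf)
                = (pre ++ v :: body) ++ v :: (dots ++ suf) from by simp]
            rw [show (pre ++ "." :: body).length = (pre ++ v :: body).length from by simp]
            rw [set_append_len]
            simp
          simp only [loopA]
          rw [if_pos (by simp at ht ⊢; omega), hadv, hret, if_pos (by omega), hswap]
          -- absorb the next head/tail scans so the IH applies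
          have hadv2 : advHead ((pre ++ [v]) ++ body ++ ("." :: (dots ++ suf))) (pre.length : Int)
              = advHead ((pre ++ [v]) ++ body ++ ("." :: (dots ++ suf))) ((pre.length : Int) + 1) := by
            apply adv_step
            · simp; omega
            · have e1 : ((pre.length : Int)).toNat = pre.length := by omega
              rw [e1, show (pre ++ [v]) ++ body ++ ("." :: (dots ++ suf))
                = pre ++ v :: (body ++ "." :: (dots ++ suf)) from by simp,
                getD_append_len]
              exact hv
          have hret2 : retTail ((pre ++ [v]) ++ body ++ ("." :: (dots ++ suf)))
                ((pre.length : Int) + body.length + 1)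
              = retTail ((pre ++ [v]) ++ body ++ ("." :: (dots ++ suf)))
                ((pre.length : Int) + body.length) := by
            have hget : ((pre ++ [v]) ++ body ++ ("." :: (dots ++ suf))).getD
                (((pre.length : Int) + body.length + 1)).toNat "" = "." := by
              rw [show (((pre.length : Int) + body.length + 1)).toNat
                  = ((pre ++ [v]) ++ body).length from by simp; omega]
              exact getD_append_len _ _ _
            rw [ret_step _ _ (by omega) hget]
            congr 1
            omega
          rw [loopA_adv, hadv2, ← loopA_adv, loopA_ret, hret2, ← loopA_ret]
          -- induction hypothesis on the strictly shorter middle segment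
          have hih := ih body.length (by simp) body (pre ++ [v]) ("." :: (dots ++ suf)) f
            ((pre.length : Int) + body.length)
            rfl
            (by intro y hy
                rcases List.mem_append.1 hy with h | h
                · exact hpre y h
                · simp at h; subst h; exact hv)
            (by intro y hy
                rcases List.mem_cons.1 hy with h | h
                · exact h
                · rcases List.mem_append.1 h with h2 | h2
                  · exact hdots y h2
                  · exact hsuf y h2)
            (by simp at hfuel ⊢; omega)
            (by simp; omega)
          rw [show (((pre ++ [v]).length : Int)) = (pre.length : Int) + 1 from by simp] at hih
          rw [hih, alt_split body v dots hv hdots]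
          simp
      · -- head element is not a dot: the head pointer just advances over it
        have hadv : advHead (pre ++ x :: xs ++ suf) (pre.length : Int)
            = advHead (pre ++ x :: xs ++ suf) ((pre.length : Int) + 1) := by
          apply adv_step
          · simp; omega
          · have e1 : ((pre.length : Int)).toNat = pre.length := by omega
            rw [e1, show pre ++ x :: xs ++ suf = pre ++ x :: (xs ++ suf) from by simp,
              getD_append_len]
            exact hx
        rw [loopA_adv, hadv, ← loopA_adv]
        have hih := ih xs.length (by simp) xs (pre ++ [x]) suf (f + 1) t
          rfl
          (by intro y hy
              rcases List.mem_append.1 hy with h | h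
              · exact hpre y h
              · simp at h; subst h; exact hx)
          hsuf
          (by simp at hfuel; omega)
          (by simp at ht ⊢; omega)
        rw [show (((pre ++ [x]).length : Int)) = (pre.length : Int) + 1 from by simp] at hih
        rw [show pre ++ x :: xs ++ suf = (pre ++ [x]) ++ xs ++ suf from by simp]
        rw [hih, alt_cons_nondot x xs hx]
        simp

-- ===== VERDICT (by name: the statement is the Claim_ definition above) =====
theorem moveEnd_spec : Claim_equal_moveEnd := by
  intro s _
  unfold Spec_moveEnd moveEnd
  have h := main_loop s.length s [] [] (s.length + 1) ((s.length : Int) - 1) rfl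
    (by simp) (by simp) (le_refl _) (by simp)
  simpa using h
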